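-- pv_equiv track=rewrite | github.com/MatteoWohlrapp/InformationSecurityAssignments | lab02/validate.py | validate_private_key
-- ===== SOURCE A (Python) =====
-- def gcd(x, y):
--     if y == 0:
--         return x
--     return gcd(y, x % y)
--
-- def summing_list(private_key):
--     sums = [private_key[0]]
--     for i in range(1, len(private_key)):
--         sum = sums[i - 1] + private_key[i]
--         sums.append(sum)
--     return sums
--
-- def validate_private_key(nums, private_key):
--     m, n = nums
--     # GCD must be 1
--     if gcd(m, n) != 1:
--         return False
--     sums = summing_list(private_key)
--     # n must be bigger than the sum of super increasing knapsack
--     if n <= sums[-1]: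
--         return False
--     # knapsack must be super increasing
--     for i in range(len(sums) - 1):
--         if sums[i] >= private_key[i + 1]:
--             return False
--     return True
-- ===== SOURCE B (Python) =====
-- def validate_private_key(nums, private_key):
--     m, n = nums
--     # gcd via iterative Euclid
--     a, b = m, n
--     while b != 0:
--         a, b = b, a % b
--     if a != 1:
--         return False
--     # single accumulator pass: superincreasing check + running sum
--     total = private_key[0]
--     for x in private_key[1:]:
--         if total >= x:
--             return False
--         total += x
--     return n > total
-- ===== Notes on version B (the rewrite author's own statement) =====
-- stated objective: simpler
-- what changed: B replaces A's recursive gcd plus the construction of a full prefix-sums list followed by a separate sentinel-index check and a second index-based scan with an iterative gcd and a single accumulator pass that checks superincreasingness while summing, returning n > total at the end.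
import Mathlib
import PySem

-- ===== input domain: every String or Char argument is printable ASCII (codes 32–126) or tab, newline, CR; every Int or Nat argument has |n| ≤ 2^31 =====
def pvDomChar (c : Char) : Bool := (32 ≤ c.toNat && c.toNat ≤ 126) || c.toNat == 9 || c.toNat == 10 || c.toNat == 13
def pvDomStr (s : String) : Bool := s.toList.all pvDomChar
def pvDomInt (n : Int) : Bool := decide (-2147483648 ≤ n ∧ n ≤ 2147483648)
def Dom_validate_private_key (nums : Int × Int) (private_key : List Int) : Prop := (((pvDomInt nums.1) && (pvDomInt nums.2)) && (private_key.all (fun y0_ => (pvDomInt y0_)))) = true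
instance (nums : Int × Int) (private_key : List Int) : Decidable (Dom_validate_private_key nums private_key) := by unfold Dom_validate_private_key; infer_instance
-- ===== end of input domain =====

-- B replaces A's prefix-sums list build plus a separate scan by a single accumulator
-- pass and an iterative gcd; objective: simpler (same O(n) cost).

-- ===== PORT A =====
-- recursive gcd, as in A
def pyGcd (x y : Int) : Int :=
  if h : y = 0 then x else pyGcd y (PySem.Int.mod x y)
termination_by y.natAbs
decreasing_by
  rcases lt_or_gt_of_ne h with hy | hy
  · have h1 := PySem.Int.mod_neg_bounds (a := x) (b := y) hy
    omega
  · have h1 := PySem.Int.mod_nonneg (a := x) (b := y) hy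
    have h2 := PySem.Int.mod_lt (a := x) (b := y) hy
    omega

-- sums = [pk[0]]; for i in range(1, len(pk)): sums.append(sums[i-1] + pk[i])
def summing_list (private_key : List Int) : List Int :=
  (PySem.List.pyRange 1 (PySem.List.len private_key) 1).foldl
    (fun sums i =>
      sums ++ [PySem.List.pyGetD sums (i - 1) 0 + PySem.List.pyGetD private_key i 0])
    [PySem.List.pyGetD private_key 0 0]

def validate_private_key (nums : Int × Int) (private_key : List Int) : Bool :=
  let m := nums.1
  let n := nums.2
  if pyGcd m n ≠ 1 then false
  else
    let sums := summing_list private_key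
    if n ≤ PySem.List.pyGetD sums (-1) 0 then false
    else
      (PySem.List.pyRange 0 (PySem.List.len sums - 1) 1).all
        (fun i => !decide (PySem.List.pyGetD sums i 0 ≥ PySem.List.pyGetD private_key (i + 1) 0))

-- ===== PORT B =====
-- while b != 0: a, b = b, a % b
def gcdLoop (a b : Int) : Int :=
  if h : b = 0 then a else gcdLoop b (PySem.Int.mod a b)
termination_by b.natAbs
decreasing_by
  rcases lt_or_gt_of_ne h with hy | hy
  · have h1 := PySem.Int.mod_neg_bounds (a := a) (b := b) hy
    omega
  · have h1 := PySem.Int.mod_nonneg (a := a) (b := b) hy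
    have h2 := PySem.Int.mod_lt (a := a) (b := b) hy
    omega

-- for x in rest: if total >= x: return False; total += x;  then return n > total
def altLoop (n : Int) (total : Int) : List Int → Bool
  | [] => decide (n > total)
  | x :: xs => if total ≥ x then false else altLoop n (total + x) xs

def validate_private_key_alt (nums : Int × Int) (private_key : List Int) : Bool :=
  let m := nums.1
  let n := nums.2
  if gcdLoop m n ≠ 1 then false
  else
    altLoop n (PySem.List.pyGetD private_key 0 0)
      (PySem.List.slice private_key (some 1) none)

-- ===== PRECONDITION & SPEC =====
-- Pre_ excludes exactly the inputs where the Python A raises IndexError: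
-- an empty private_key reached when gcd(m, n) == 1 (B raises there too);
-- Python's Euclid returns 1 exactly when n > 0 with gcd(m, n) = 1, or n = 0 and m = 1.
def Pre_validate_private_key (nums : Int × Int) (private_key : List Int) : Prop :=
  private_key ≠ [] ∨ ¬((nums.2 = 0 ∧ nums.1 = 1) ∨ (0 < nums.2 ∧ Int.gcd nums.1 nums.2 = 1))
instance (nums : Int × Int) (private_key : List Int) : Decidable (Pre_validate_private_key nums private_key) := by unfold Pre_validate_private_key; infer_instance

def pvWitness_validate_private_key : (Int × Int) × List Int := ((3, 10), [1, 2, 4])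

def Spec_validate_private_key (nums : Int × Int) (private_key : List Int) (out : Bool) : Prop := out = validate_private_key_alt nums private_key
instance (nums : Int × Int) (private_key : List Int) (out : Bool) : Decidable (Spec_validate_private_key nums private_key out) := by unfold Spec_validate_private_key; infer_instance

-- ===== CLAIM (what is proved, stated in full; the proofs are below) =====
def Claim_equal_validate_private_key : Prop := ∀ (nums : Int × Int) (private_key : List Int), Dom_validate_private_key nums private_key → Pre_validate_private_key nums private_key → Spec_validate_private_key nums private_key (validate_private_key nums private_key)

-- ===== LEMMAS AND PROOFS =====

-- the two gcd helpers have the same recursion tree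
theorem gcdLoop_eq_pyGcd (a b : Int) : gcdLoop a b = pyGcd a b := by
  rw [gcdLoop, pyGcd]
  split
  · rfl
  · exact gcdLoop_eq_pyGcd b (PySem.Int.mod a b)
termination_by b.natAbs
decreasing_by
  rename_i h
  rcases lt_or_gt_of_ne h with hy | hy
  · have h1 := PySem.Int.mod_neg_bounds (a := a) (b := b) hy
    omega
  · have h1 := PySem.Int.mod_nonneg (a := a) (b := b) hy
    have h2 := PySem.Int.mod_lt (a := a) (b := b) hy
    omega

-- Euclid's step for Int.gcd with Python's floor mod
theorem gcd_step (m n : Int) : Int.gcd n (m % n) = Int.gcd m n := by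
  apply Nat.dvd_antisymm
  · apply Int.dvd_gcd
    · have h1 : (↑(Int.gcd n (m % n)) : Int) ∣ n := Int.gcd_dvd_left n (m % n)
      have h2 : (↑(Int.gcd n (m % n)) : Int) ∣ m % n := Int.gcd_dvd_right n (m % n)
      have h3 : m = n * (m / n) + m % n := by
        have := Int.mul_ediv_add_emod m n
        omega
      have h4 : (↑(Int.gcd n (m % n)) : Int) ∣ n * (m / n) + m % n :=
        Dvd.dvd.add (Dvd.dvd.mul_right h1 _) h2
      rwa [← h3] at h4
    · exact Int.gcd_dvd_left n (m % n)
  · apply Int.dvd_gcd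
    · exact Int.gcd_dvd_right m n
    · have h1 : (↑(Int.gcd m n) : Int) ∣ m := Int.gcd_dvd_left m n
      have h2 : (↑(Int.gcd m n) : Int) ∣ n := Int.gcd_dvd_right m n
      rw [Int.emod_def]
      exact dvd_sub h1 (Dvd.dvd.mul_right h2 _)

theorem pyGcd_of_pos (m n : Int) (hn : 0 < n) : pyGcd m n = Int.gcd m n := by
  rw [pyGcd, dif_neg (by omega : ¬ n = 0)]
  by_cases h0 : PySem.Int.mod m n = 0
  · rw [h0, pyGcd, dif_pos rfl]
    have hdvd : n ∣ m := (PySem.Int.mod_eq_zero_iff_dvd m n).mp h0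
    rw [Int.gcd_eq_natAbs_right hdvd]
    omega
  · have hpos : 0 < PySem.Int.mod m n :=
      lt_of_le_of_ne (PySem.Int.mod_nonneg (a := m) (b := n) hn) (Ne.symm h0)
    rw [pyGcd_of_pos n _ hpos, PySem.Int.mod_eq_emod_of_pos hn, gcd_step]
termination_by n.natAbs
decreasing_by
  have h1 := PySem.Int.mod_nonneg (a := m) (b := n) hn
  have h2 := PySem.Int.mod_lt (a := m) (b := n) hn
  omega

theorem pyGcd_of_neg (m n : Int) (hn : n < 0) : pyGcd m n < 0 := by
  rw [pyGcd, dif_neg (by omega : ¬ n = 0)]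
  by_cases h0 : PySem.Int.mod m n = 0
  · rw [h0, pyGcd, dif_pos rfl]
    exact hn
  · have hb := PySem.Int.mod_neg_bounds (a := m) (b := n) hn
    exact pyGcd_of_neg n _ (by omega)
termination_by n.natAbs
decreasing_by
  have hb := PySem.Int.mod_neg_bounds (a := m) (b := n) hn
  omega

-- Python's recursive Euclid returns 1 exactly on the closed-form condition in Pre_
theorem pyGcd_eq_one_iff (m n : Int) :
    pyGcd m n = 1 ↔ ((n = 0 ∧ m = 1) ∨ (0 < n ∧ Int.gcd m n = 1)) := by
  rcases lt_trichotomy n 0 with hn | hn | hn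
  · have := pyGcd_of_neg m n hn
    constructor
    · intro h; omega
    · rintro (⟨h, -⟩ | ⟨h, -⟩) <;> omega
  · subst hn
    rw [pyGcd, dif_pos rfl]
    constructor
    · intro h; exact Or.inl ⟨rfl, h⟩
    · rintro (⟨-, h⟩ | ⟨h, -⟩)
      · exact h
      · omega
  · rw [pyGcd_of_pos m n hn]
    constructor
    · intro h
      exact Or.inr ⟨hn, by exact_mod_cast h⟩
    · rintro (⟨h, -⟩ | ⟨-, h⟩)
      · omega
      · exact_mod_cast h

-- proof-side prefix-sum list: scan a l = [a, a+l0, a+l0+l1, …]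
def scan (a : Int) : List Int → List Int
  | [] => [a]
  | x :: xs => a :: scan (a + x) xs

theorem scan_ne_nil (a : Int) (l : List Int) : scan a l ≠ [] := by
  cases l <;> simp [scan]

theorem scan_length (a : Int) (l : List Int) : (scan a l).length = l.length + 1 := by
  induction l generalizing a with
  | nil => simp [scan]
  | cons x xs ih => simp [scan, ih]

theorem scan_getLast (a : Int) (l : List Int) (h : scan a l ≠ []) :
    (scan a l).getLast h = a + l.sum := by
  induction l generalizing a with
  | nil => simp [scan]
  | cons x xs ih =>
    simp only [scan]
    rw [List.getLast_cons (scan_ne_nil _ _), ih]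
    simp; ring

theorem scan_append (a : Int) (l : List Int) (x : Int) :
    scan a (l ++ [x]) = scan a l ++ [a + l.sum + x] := by
  induction l generalizing a with
  | nil => simp [scan]
  | cons y ys ih =>
    simp only [List.cons_append, scan, ih]
    simp; ring_nf

theorem pyGetD_append_left (xs : List Int) (x : Int) (i : Int) (h0 : 0 ≤ i) (hk : i < xs.length) :
    PySem.List.pyGetD (xs ++ [x]) i 0 = PySem.List.pyGetD xs i 0 := by
  obtain ⟨k, rfl⟩ := Int.eq_ofNat_of_zero_le h0
  simp only [PySem.List.pyGetD_natCast, List.getD_eq_getElem?_getD]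
  rw [List.getElem?_append_left (by exact_mod_cast hk)]

theorem scan_getD_last (a : Int) (l : List Int) : (scan a l).getD l.length 0 = a + l.sum := by
  have hlen := scan_length a l
  have hne := scan_ne_nil a l
  rw [List.getD_eq_getElem _ _ (by omega)]
  rw [← scan_getLast a l hne, List.getLast_eq_getElem]
  congr 1; omega

theorem summing_list_eq_scan (p : Int) (ps : List Int) :
    summing_list (p :: ps) = scan p ps := by
  induction ps using List.reverseRecOn with
  | nil =>
    unfold summing_list
    rw [show PySem.List.len [p] = 1 by simp [PySem.List.len_eq]]
    rw [PySem.List.pyRange_one_eq_nil le_rfl]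
    simp [scan]
  | append_singleton ps x ih =>
    unfold summing_list
    have hlen : PySem.List.len (p :: (ps ++ [x])) = ((ps.length : Int) + 1) + 1 := by
      simp [PySem.List.len_eq]
    rw [hlen, PySem.List.pyRange_one_succ_right (by omega), List.foldl_append]
    have hcons : p :: (ps ++ [x]) = (p :: ps) ++ [x] := by simp
    have hget0 : PySem.List.pyGetD (p :: (ps ++ [x])) 0 0 = p := PySem.List.pyGetD_zero_cons _ _ _
    rw [hget0]
    have hcongr : (PySem.List.pyRange 1 ((ps.length : Int) + 1) 1).foldl
        (fun sums i => sums ++ [PySem.List.pyGetD sums (i - 1) 0 + PySem.List.pyGetD (p :: (ps ++ [x])) i 0]) [p]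
      = (PySem.List.pyRange 1 ((ps.length : Int) + 1) 1).foldl
        (fun sums i => sums ++ [PySem.List.pyGetD sums (i - 1) 0 + PySem.List.pyGetD (p :: ps) i 0]) [p] := by
      apply PySem.List.foldl_congr_mem
      intro acc i hi
      rw [PySem.List.mem_pyRange_one] at hi
      rw [hcons, pyGetD_append_left _ _ _ (by omega) (by simp; omega)]
    rw [hcongr]
    have hih : (PySem.List.pyRange 1 ((ps.length : Int) + 1) 1).foldl
        (fun sums i => sums ++ [PySem.List.pyGetD sums (i - 1) 0 + PySem.List.pyGetD (p :: ps) i 0]) [p]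
      = scan p ps := by
      rw [← ih]
      unfold summing_list
      have : PySem.List.len (p :: ps) = ((ps.length : Int) + 1) := by simp [PySem.List.len_eq]
      rw [this, PySem.List.pyGetD_zero_cons]
    have h1 : PySem.List.pyGetD (scan p ps) ((ps.length : Int) + 1 - 1) 0 = p + ps.sum := by
      have he : ((ps.length : Int) + 1 - 1) = ((ps.length : Nat) : Int) := by ring
      rw [he, PySem.List.pyGetD_natCast]
      exact scan_getD_last p ps
    have h2 : PySem.List.pyGetD (p :: (ps ++ [x])) ((ps.length : Int) + 1) 0 = x := by
      have he : ((ps.length : Int) + 1) = (((p :: ps).length : Nat) : Int) := by simp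
      rw [hcons, he]
      simp only [PySem.List.pyGetD_natCast, List.getD_eq_getElem?_getD]
      rw [List.getElem?_append_right le_rfl]
      simp
    rw [hih]
    simp only [List.foldl_cons, List.foldl_nil]
    rw [h1, h2, scan_append]

theorem all_char (p : Int) (ps : List Int) :
    ((PySem.List.pyRange 0 ((ps.length : Int)) 1).all
      (fun i => !decide (PySem.List.pyGetD (scan p ps) i 0 ≥ PySem.List.pyGetD (p :: ps) (i + 1) 0)) = true)
    ↔ ∀ k : Nat, k < ps.length → (scan p ps).getD k 0 < ps.getD k 0 := by
  rw [List.all_eq_true]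
  constructor
  · intro h k hk
    have hm : (k : Int) ∈ PySem.List.pyRange 0 (ps.length : Int) 1 := by
      rw [PySem.List.mem_pyRange_one]; omega
    have := h _ hm
    simp only [Bool.not_eq_eq_eq_not, Bool.not_true, decide_eq_false_iff_not, not_le] at this
    have he : ((k : Int) + 1) = ((k + 1 : Nat) : Int) := by push_cast; ring
    rw [he, PySem.List.pyGetD_natCast, PySem.List.pyGetD_natCast, List.getD_cons_succ] at this
    exact this
  · intro h i hi
    rw [PySem.List.mem_pyRange_one] at hi
    obtain ⟨k, rfl⟩ := Int.eq_ofNat_of_zero_le hi.1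
    have hk : k < ps.length := by exact_mod_cast hi.2
    simp only [Bool.not_eq_eq_eq_not, Bool.not_true, decide_eq_false_iff_not, not_le]
    have he : ((k : Int) + 1) = ((k + 1 : Nat) : Int) := by push_cast; ring
    rw [he, PySem.List.pyGetD_natCast, PySem.List.pyGetD_natCast, List.getD_cons_succ]
    exact h k hk

theorem altLoop_iff (n : Int) (t : Int) (l : List Int) :
    altLoop n t l = true ↔
      (t + l.sum < n ∧ ∀ k : Nat, k < l.length → (scan t l).getD k 0 < l.getD k 0) := by
  induction l generalizing t with
  | nil => simp [altLoop, scan]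
  | cons x xs ih =>
    simp only [altLoop, scan, List.sum_cons, List.length_cons]
    by_cases hx : t ≥ x
    · simp only [if_pos hx]
      constructor
      · intro h; exact absurd h (by simp)
      · rintro ⟨-, h2⟩
        have := h2 0 (by omega)
        simp at this; omega
    · simp only [if_neg hx, ih]
      constructor
      · rintro ⟨h1, h2⟩
        refine ⟨by omega, ?_⟩
        intro k hk
        cases k with
        | zero => simpa using (by omega : t < x)
        | succ k => simpa using h2 k (by omega)
      · rintro ⟨h1, h2⟩
        refine ⟨by omega, ?_⟩
        intro k hk
        simpa using h2 (k + 1) (by omega)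

-- ===== VERDICT (by name: the statement is the Claim_ definition above) =====
theorem validate_private_key_spec : Claim_equal_validate_private_key := by
  intro nums pk hdom hpre
  obtain ⟨m, n⟩ := nums
  unfold Spec_validate_private_key validate_private_key validate_private_key_alt
  simp only [gcdLoop_eq_pyGcd]
  by_cases hg : pyGcd m n ≠ 1
  · rw [if_pos hg, if_pos hg]
  · rw [if_neg hg, if_neg hg]
    have hpk : pk ≠ [] := by
      rcases hpre with h | h
      · exact h
      · rw [Decidable.not_not] at hg
        exact absurd ((pyGcd_eq_one_iff m n).mp hg) h
    cases pk with
    | nil => exact absurd rfl hpk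
    | cons p ps =>
      rw [summing_list_eq_scan, PySem.List.pyGetD_zero_cons, PySem.List.slice_from_one,
          List.tail_cons]
      have hlast : PySem.List.pyGetD (scan p ps) (-1) 0 = p + ps.sum := by
        rw [PySem.List.pyGetD_neg_one _ _ (scan_ne_nil p ps)]
        exact scan_getLast p ps (scan_ne_nil p ps)
      rw [hlast]
      have hlen : PySem.List.len (scan p ps) - 1 = ((ps.length : Int)) := by
        rw [PySem.List.len_eq, scan_length]; push_cast; ring
      rw [hlen]
      by_cases hle : n ≤ p + ps.sum
      · rw [if_pos hle]
        have hfalse : altLoop n p ps = false := by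
          rw [← Bool.not_eq_true, altLoop_iff]
          rintro ⟨h1, -⟩; omega
        rw [hfalse]
      · rw [if_neg hle]
        rw [Bool.eq_iff_iff, all_char, altLoop_iff]
        constructor
        · intro h
          exact ⟨by omega, h⟩
        · rintro ⟨-, h⟩
          exact h
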